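-- pv_equiv track=rewrite | github.com/arturo-natella/clinical-intelligence-hub | src/analysis/biomarker_cascades.py | _build_lab_lookup
-- ===== SOURCE A (Python) =====
-- def _build_lab_lookup(labs: list) -> dict:
--     """Build lookup: lowered test name → latest result dict."""
--     lookup = {}
--     for lab in labs:
--         name = lab.get("name", "").lower().strip()
--         if not name:
--             continue
--
--         entry = {
--             "value": lab.get("value", lab.get("value_text", "")),
--             "unit": lab.get("unit", ""),
--             "flag": (lab.get("flag") or "").lower(),
--             "date": lab.get("test_date", ""),
--         }
--
--         # Keep most recent
--         if name not in lookup or (entry["date"] > lookup[name]["date"]):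
--             lookup[name] = entry
--
--     return lookup
-- ===== SOURCE B (Python) =====
-- def _build_lab_lookup(labs: list) -> dict:
--     """Build lookup: lowered test name -> latest result dict.
--
--     Two-pass: group all entries by name, then pick each group's winner with
--     max(key=date), which keeps the first element at the maximal date and so
--     matches the original's strict-'>' keep-first-on-tie rule.
--     """
--     groups = {}
--     for lab in labs:
--         name = lab.get("name", "").lower().strip()
--         if not name:
--             continue
--         groups.setdefault(name, []).append({
--             "value": lab.get("value", lab.get("value_text", "")),
--             "unit": lab.get("unit", ""),
--             "flag": (lab.get("flag") or "").lower(),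
--             "date": lab.get("test_date", ""),
--         })
--     return {name: max(entries, key=lambda e: e["date"])
--             for name, entries in groups.items()}
-- ===== Notes on version B (the rewrite author's own statement) =====
-- stated objective: alternative
-- what changed: Single-pass conditional-overwrite loop replaced by a two-pass decomposition: group entries by lowered name, then reduce each group with max(key=date), whose keep-first-at-max rule reproduces the strict-'>' tie-breaking.
import Mathlib
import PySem

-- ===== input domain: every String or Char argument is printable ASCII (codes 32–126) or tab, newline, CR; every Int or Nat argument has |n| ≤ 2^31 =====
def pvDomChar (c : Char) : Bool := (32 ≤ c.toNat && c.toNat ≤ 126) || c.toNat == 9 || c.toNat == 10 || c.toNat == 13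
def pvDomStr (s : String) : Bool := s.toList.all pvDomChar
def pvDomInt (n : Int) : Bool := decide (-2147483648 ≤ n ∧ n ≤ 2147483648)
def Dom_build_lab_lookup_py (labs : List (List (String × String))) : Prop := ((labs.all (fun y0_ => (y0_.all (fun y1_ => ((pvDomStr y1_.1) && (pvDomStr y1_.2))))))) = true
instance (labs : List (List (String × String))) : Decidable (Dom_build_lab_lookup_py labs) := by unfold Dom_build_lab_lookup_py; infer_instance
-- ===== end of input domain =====

-- B replaces A's single-pass conditional-overwrite loop by a two-pass decomposition (group by name,
-- then reduce each group with max-by-date); same cost, alternative structure.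

-- ===== PORT A =====
-- shared with port B: both Pythons compute the lowered/stripped name and the same entry dict
def pvLabName (lab : List (String × String)) : String :=
  PySem.Str.strip (PySem.Str.lower (PySem.Dict.getD (PySem.Dict.mk lab) "name" ""))

-- the entry dict literal; note (lab.get("flag") or "") equals lab.get("flag", "") on string values
def pvEntry (lab : List (String × String)) : List (String × String) :=
  [("value", PySem.Dict.getD (PySem.Dict.mk lab) "value" (PySem.Dict.getD (PySem.Dict.mk lab) "value_text" "")),
   ("unit", PySem.Dict.getD (PySem.Dict.mk lab) "unit" ""),
   ("flag", PySem.Str.lower (PySem.Dict.getD (PySem.Dict.mk lab) "flag" "")),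
   ("date", PySem.Dict.getD (PySem.Dict.mk lab) "test_date" "")]

-- e["date"]; every entry built above carries a "date" key, so getD never takes its default
def pvDate (e : List (String × String)) : String := PySem.Dict.getD (PySem.Dict.mk e) "date" ""

-- one iteration of A's loop body
def pvAStep (lookup : PySem.Dict String (List (String × String))) (lab : List (String × String)) :
    PySem.Dict String (List (String × String)) :=
  let name := pvLabName lab
  if name = "" then lookup
  else
    let entry := pvEntry lab
    if lookup.contains name = false then lookup.insert name entry
    else if pvDate (lookup.getD name []) < pvDate entry then lookup.insert name entry
    else lookup

def build_lab_lookup_py (labs : List (List (String × String))) : List (String × List (String × String)) :=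
  (labs.foldl pvAStep PySem.Dict.empty).items

-- ===== PORT B =====
-- one iteration of B's grouping loop: groups.setdefault(name, []).append(entry)
def pvBStep (groups : PySem.Dict String (List (List (String × String)))) (lab : List (String × String)) :
    PySem.Dict String (List (List (String × String))) :=
  let name := pvLabName lab
  if name = "" then groups
  else groups.modify name [] (fun es => es ++ [pvEntry lab])

-- max(entries, key=lambda e: e["date"]) — first element at the maximal date
def pvPick (es : List (List (String × String))) : List (String × String) :=
  (PySem.List.max? es pvDate).getD []

def build_lab_lookup_py_alt (labs : List (List (String × String))) : List (String × List (String × String)) :=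
  let groups := labs.foldl pvBStep PySem.Dict.empty
  groups.items.map (fun p => (p.1, pvPick p.2))

-- ===== PRECONDITION & SPEC =====
def Spec_build_lab_lookup_py (labs : List (List (String × String))) (out : List (String × List (String × String))) : Prop := out = build_lab_lookup_py_alt labs
instance (labs : List (List (String × String))) (out : List (String × List (String × String))) : Decidable (Spec_build_lab_lookup_py labs out) := by unfold Spec_build_lab_lookup_py; infer_instance

-- ===== CLAIM (what is proved, stated in full; the proofs are below) =====
def Claim_equal_build_lab_lookup_py : Prop := ∀ (labs : List (List (String × String))), Dom_build_lab_lookup_py labs → Spec_build_lab_lookup_py labs (build_lab_lookup_py labs)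

-- ===== LEMMAS AND PROOFS =====

-- max over a group grows exactly by A's strict-'>' keep-first rule
theorem pvPick_append (es : List (List (String × String))) (e : List (String × String)) (h : es ≠ []) :
    pvPick (es ++ [e]) = if pvDate (pvPick es) < pvDate e then e else pvPick es := by
  obtain ⟨m, hm⟩ : ∃ m, PySem.List.max? es pvDate = some m := by
    cases hmax : PySem.List.max? es pvDate with
    | none => exact absurd ((PySem.List.max?_eq_none_iff es pvDate).mp hmax) h
    | some m => exact ⟨m, rfl⟩
  unfold pvPick PySem.List.max? at *
  rw [List.foldl_append, hm]
  simp only [List.foldl, Option.getD_some]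
  split_ifs <;> rfl

-- first-match lookup commutes with a value-map on the items list
theorem pvGet?_mk_map {ν ν' : Type} (g : ν → ν') (l : List (String × ν)) (k : String) :
    (PySem.Dict.mk (l.map (fun p => (p.1, g p.2)))).get? k = ((PySem.Dict.mk l).get? k).map g := by
  induction l with
  | nil => simp [PySem.Dict.get?]
  | cons p t ih =>
      simp only [List.map_cons]
      rw [PySem.Dict.get?_mk_cons, PySem.Dict.get?_mk_cons]
      split <;> simp [ih]

-- loop invariant: A's dict is pointwise the pvPick-reduction of B's grouping dict
theorem pvLoop_items (labs : List (List (String × String))) :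
    ∀ (g : PySem.Dict String (List (List (String × String))))
      (d : PySem.Dict String (List (String × String))),
      g.keys.Nodup →
      (∀ p ∈ g.items, p.2 ≠ []) →
      d.items = g.items.map (fun p => (p.1, pvPick p.2)) →
      (labs.foldl pvAStep d).items = ((labs.foldl pvBStep g).items).map (fun p => (p.1, pvPick p.2)) := by
  induction labs with
  | nil => intro g d _ _ h; simpa using h
  | cons lab rest ih =>
      intro g d hnd hne hit
      simp only [List.foldl_cons]
      have hget : ∀ k, d.get? k = (g.get? k).map pvPick := by
        intro k
        have hd : d = PySem.Dict.mk (g.items.map (fun p => (p.1, pvPick p.2))) := by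
          cases d; simpa using hit
        have hg : PySem.Dict.mk g.items = g := rfl
        rw [hd, pvGet?_mk_map, hg]
      have hcont : ∀ k, d.contains k = g.contains k := by
        intro k
        rw [PySem.Dict.contains_eq_isSome_get?, PySem.Dict.contains_eq_isSome_get?, hget k]
        cases g.get? k <;> rfl
      by_cases hname : pvLabName lab = ""
      · have ha : pvAStep d lab = d := by simp only [pvAStep]; rw [if_pos hname]
        have hb : pvBStep g lab = g := by simp only [pvBStep]; rw [if_pos hname]
        rw [ha, hb]; exact ih g d hnd hne hit
      · have hb : pvBStep g lab =
            g.insert (pvLabName lab) (g.getD (pvLabName lab) [] ++ [pvEntry lab]) := by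
          simp only [pvBStep, PySem.Dict.modify]; rw [if_neg hname]
        have hnd' : (pvBStep g lab).keys.Nodup := by
          rw [hb]; exact PySem.Dict.nodup_keys_insert _ _ _ hnd
        by_cases hc : g.contains (pvLabName lab) = true
        · -- name already grouped: A conditionally overwrites, B appends to the group
          obtain ⟨es, hes⟩ : ∃ es, g.get? (pvLabName lab) = some es := by
            rw [PySem.Dict.contains_eq_isSome_get?] at hc
            cases hgs : g.get? (pvLabName lab) with
            | none => rw [hgs] at hc; exact absurd hc (by simp)
            | some es => exact ⟨es, rfl⟩
          have hesne : es ≠ [] :=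
            hne (pvLabName lab, es)
              ((PySem.Dict.get?_eq_some_iff_mem_items g (pvLabName lab) es hnd).mp hes)
          have hdg : d.getD (pvLabName lab) [] = pvPick es := by
            rw [PySem.Dict.getD_eq_get?_getD, hget, hes]; rfl
          have hgg : g.getD (pvLabName lab) [] = es := by
            rw [PySem.Dict.getD_eq_get?_getD, hes]; rfl
          have hdc : d.contains (pvLabName lab) = true := by rw [hcont]; exact hc
          have hbit : (pvBStep g lab).items =
              g.items.map (fun p => if (p.1 == pvLabName lab) = true
                then (pvLabName lab, es ++ [pvEntry lab]) else p) := by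
            rw [hb, hgg, PySem.Dict.items_insert_of_contains _ _ hc]
          have hmem_eq : ∀ p ∈ g.items, (p.1 == pvLabName lab) = true → p = (pvLabName lab, es) := by
            intro p hp hpk
            obtain ⟨a, b⟩ := p
            have hk : a = pvLabName lab := by simpa using hpk
            have h2 : g.get? (pvLabName lab) = some b := by
              rw [← hk]
              exact (PySem.Dict.get?_eq_some_iff_mem_items g a b hnd).mpr hp
            rw [hes] at h2
            rw [hk, Option.some.inj h2]
          have hne' : ∀ p ∈ (pvBStep g lab).items, p.2 ≠ [] := by
            rw [hbit]; intro p hp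
            obtain ⟨q, hq, hqe⟩ := List.mem_map.mp hp
            by_cases hqk : (q.1 == pvLabName lab) = true
            · rw [if_pos hqk] at hqe; rw [← hqe]; simp
            · rw [if_neg hqk] at hqe; rw [← hqe]; exact hne q hq
          have hpk := pvPick_append es (pvEntry lab) hesne
          have key : (pvAStep d lab).items = ((pvBStep g lab).items).map (fun p => (p.1, pvPick p.2)) := by
            rw [hbit, List.map_map]
            by_cases hlt : pvDate (pvPick es) < pvDate (pvEntry lab)
            · have ha : pvAStep d lab = d.insert (pvLabName lab) (pvEntry lab) := by
                simp only [pvAStep]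
                rw [if_neg hname, if_neg (by simp [hdc]), hdg, if_pos hlt]
              rw [ha, PySem.Dict.items_insert_of_contains _ _ hdc, hit, List.map_map]
              apply List.map_congr_left
              intro p hp
              by_cases hpk2 : (p.1 == pvLabName lab) = true
              · rw [hmem_eq p hp hpk2]
                simp only [Function.comp]
                simp [hpk, hlt]
              · simp only [Function.comp]
                rw [if_neg (by simpa using hpk2), if_neg hpk2]
            · have ha : pvAStep d lab = d := by
                simp only [pvAStep]
                rw [if_neg hname, if_neg (by simp [hdc]), hdg, if_neg hlt]
              rw [ha, hit]
              apply List.map_congr_left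
              intro p hp
              by_cases hpk2 : (p.1 == pvLabName lab) = true
              · rw [hmem_eq p hp hpk2]
                simp only [Function.comp]
                simp [hpk, hlt]
              · simp only [Function.comp]
                rw [if_neg hpk2]
          exact ih (pvBStep g lab) (pvAStep d lab) hnd' hne' key
        · -- fresh name: both dicts append
          have hcf : g.contains (pvLabName lab) = false := by simpa using hc
          have hdcf : d.contains (pvLabName lab) = false := by rw [hcont]; exact hcf
          have ha : pvAStep d lab = d.insert (pvLabName lab) (pvEntry lab) := by
            simp only [pvAStep]
            rw [if_neg hname, if_pos hdcf]
          have hbit : (pvBStep g lab).items = g.items ++ [(pvLabName lab, [pvEntry lab])] := by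
            rw [hb, PySem.Dict.getD_of_not_contains _ _ hcf,
                PySem.Dict.items_insert_of_not_contains _ _ hcf]
            rfl
          have hne' : ∀ p ∈ (pvBStep g lab).items, p.2 ≠ [] := by
            rw [hbit]; intro p hp
            rcases List.mem_append.mp hp with h1 | h1
            · exact hne p h1
            · simp at h1; rw [h1]; simp
          have key : (pvAStep d lab).items = ((pvBStep g lab).items).map (fun p => (p.1, pvPick p.2)) := by
            rw [ha, PySem.Dict.items_insert_of_not_contains _ _ hdcf, hbit, List.map_append, hit]
            rfl
          exact ih (pvBStep g lab) (pvAStep d lab) hnd' hne' key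

-- ===== VERDICT (by name: the statement is the Claim_ definition above) =====
theorem build_lab_lookup_py_spec : Claim_equal_build_lab_lookup_py := by
  intro labs _
  unfold Spec_build_lab_lookup_py build_lab_lookup_py build_lab_lookup_py_alt
  exact pvLoop_items labs PySem.Dict.empty PySem.Dict.empty PySem.Dict.nodup_keys_empty
    (by intro p hp; simp [PySem.Dict.empty] at hp) (by simp [PySem.Dict.empty])
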